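-- pv_equiv track=rewrite | github.com/mrbartrns/algorithm-and-structure | programmers/lv4/cave_2.py | solution
-- ===== SOURCE A (Python) =====
-- def solution(n, path, order):
--     graph = [[] for _ in range(n)]
--     for a, b in path:
--         graph[a].append(b)
--         graph[b].append(a)
--
--     visited = [False] * n
--     prev_visit = [0] * n
--     next_visit = [0] * n
--     for a, b in order:
--         prev_visit[b] = a
--
--     if prev_visit[0] > 0:
--         return False
--
--     visited[0] = True
--     dfs(0, prev_visit, next_visit, visited, graph)
--     cnt = 0
--     for i in range(len(visited)):
--         if visited[i]:
--             cnt += 1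
--     return True if cnt == n else False
--
-- def dfs(node, prev_visit, next_visit, visited, graph):
--     if not visited[prev_visit[node]]:
--         next_visit[prev_visit[node]] = node
--         return
--
--     visited[node] = True
--     if next_visit[node] and not visited[next_visit[node]]:
--         dfs(next_visit[node], prev_visit, next_visit, visited, graph)
--     for i in graph[node]:
--         if not visited[i]:
--             dfs(i, prev_visit, next_visit, visited, graph)
-- ===== SOURCE B (Python) =====
-- def solution(n, path, order):
--     graph = [[] for _ in range(n)]
--     for a, b in path:
--         graph[a].append(b)
--         graph[b].append(a)
--
--     visited = [False] * n
--     prev_visit = [0] * n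
--     next_visit = [0] * n
--     for a, b in order:
--         prev_visit[b] = a
--
--     if prev_visit[0] > 0:
--         return False
--
--     visited[0] = True
--     # iterative DFS with an explicit stack instead of recursion
--     if not visited[prev_visit[0]]:
--         next_visit[prev_visit[0]] = 0
--     else:
--         stack = list(reversed(graph[0]))  # next_visit[0] == 0 here, so no dive frame for the root
--         while stack:
--             node = stack.pop()
--             if visited[node]:
--                 continue
--             if not visited[prev_visit[node]]:
--                 next_visit[prev_visit[node]] = node
--                 continue
--             visited[node] = True
--             for nb in reversed(graph[node]):
--                 stack.append(nb)
--             if next_visit[node] and not visited[next_visit[node]]: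
--                 stack.append(next_visit[node])
--     return visited.count(True) == n
-- ===== Notes on version B (the rewrite author's own statement) =====
-- stated objective: alternative
-- what changed: A's recursive dfs (which recurses into the deferred next_visit node and then into each unvisited neighbour) is replaced by an iterative DFS over an explicit stack whose pop-time visited checks reproduce the recursion's exact traversal order, so no Python recursion is used at all.
-- outside the precondition, e.g. on solution(1, [], [(5, 0)]): A returns False, B returns False
import Mathlib
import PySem

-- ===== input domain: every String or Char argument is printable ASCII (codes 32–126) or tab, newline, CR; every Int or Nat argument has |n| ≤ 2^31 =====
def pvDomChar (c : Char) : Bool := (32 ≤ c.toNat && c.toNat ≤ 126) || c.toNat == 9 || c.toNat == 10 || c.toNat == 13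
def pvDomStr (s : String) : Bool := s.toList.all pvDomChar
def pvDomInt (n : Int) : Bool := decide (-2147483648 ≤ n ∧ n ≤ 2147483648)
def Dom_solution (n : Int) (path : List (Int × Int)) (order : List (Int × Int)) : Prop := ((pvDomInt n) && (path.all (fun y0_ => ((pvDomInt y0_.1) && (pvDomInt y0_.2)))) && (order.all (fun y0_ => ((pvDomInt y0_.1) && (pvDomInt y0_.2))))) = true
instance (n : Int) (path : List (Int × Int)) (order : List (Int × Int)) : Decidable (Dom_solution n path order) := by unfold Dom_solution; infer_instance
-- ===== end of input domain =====

-- B replaces A's recursive dfs by an explicit-stack iterative DFS that performs the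
-- same traversal in the same order (objective: alternative, no speed claim).

-- ===== PORT A =====
-- Both Pythons build the adjacency list and prev_visit table with identical loops;
-- these two helpers are that shared setup code.
def pvGraph (n : Int) (path : List (Int × Int)) : List (List Int) :=
  path.foldl (fun g ab =>
    let g1 := PySem.List.pySetD g ab.1 (PySem.List.pyGetD g ab.1 [] ++ [ab.2])
    PySem.List.pySetD g1 ab.2 (PySem.List.pyGetD g1 ab.2 [] ++ [ab.1]))
    (List.replicate n.toNat ([] : List Int))

def pvPrev (n : Int) (order : List (Int × Int)) : List Int :=
  order.foldl (fun p ab => PySem.List.pySetD p ab.2 ab.1) (List.replicate n.toNat (0 : Int))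

-- A's recursive dfs; the `for i in graph[node]` loop is the mutual pvDfsList.
-- The Nat argument is fuel, a standard totality device; `solution` passes enough of
-- it that it is never exhausted on inputs satisfying Pre_solution (proved below).
mutual
def pvDfs (graph : List (List Int)) (prev : List Int) :
    Nat → Int → List Int → List Bool → List Int × List Bool
  | 0, _, nv, vis => (nv, vis)
  | f+1, node, nv, vis =>
    if PySem.List.pyGetD vis (PySem.List.pyGetD prev node 0) false = false then
      (PySem.List.pySetD nv (PySem.List.pyGetD prev node 0) node, vis)
    else
      let vis1 := PySem.List.pySetD vis node true
      let d := PySem.List.pyGetD nv node 0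
      if d ≠ 0 ∧ PySem.List.pyGetD vis1 d false = false then
        let st2 := pvDfs graph prev f d nv vis1
        pvDfsList graph prev f (PySem.List.pyGetD graph node []) st2.1 st2.2
      else
        pvDfsList graph prev f (PySem.List.pyGetD graph node []) nv vis1
termination_by f _ _ _ => (f, 0)

def pvDfsList (graph : List (List Int)) (prev : List Int) :
    Nat → List Int → List Int → List Bool → List Int × List Bool
  | _, [], nv, vis => (nv, vis)
  | f, c :: cs, nv, vis =>
    if PySem.List.pyGetD vis c false = false then
      let st := pvDfs graph prev f c nv vis
      pvDfsList graph prev f cs st.1 st.2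
    else pvDfsList graph prev f cs nv vis
termination_by f cs _ _ => (f, cs.length + 1)
end

def solution (n : Int) (path : List (Int × Int)) (order : List (Int × Int)) : Bool :=
  let graph := pvGraph n path
  let prev := pvPrev n order
  if PySem.List.pyGetD prev 0 0 > 0 then false
  else
    let vis0 := PySem.List.pySetD (List.replicate n.toNat false) 0 true
    let st := pvDfs graph prev (n.toNat + 2) 0 (List.replicate n.toNat (0 : Int)) vis0
    decide ((st.2.foldl (fun c b => if b then c + 1 else c) (0 : Int)) = n)

-- ===== PORT B =====
-- B's while-loop over the explicit stack (head of the list = top of the stack).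
-- Fuel again only makes the loop total; `solution_alt` passes enough (proved below).
def pvRun (graph : List (List Int)) (prev : List Int) :
    Nat → List Int → List Int → List Bool → List Int × List Bool
  | _, [], nv, vis => (nv, vis)
  | 0, _ :: _, nv, vis => (nv, vis)
  | f+1, node :: rest, nv, vis =>
    if PySem.List.pyGetD vis node false then pvRun graph prev f rest nv vis
    else if PySem.List.pyGetD vis (PySem.List.pyGetD prev node 0) false = false then
      pvRun graph prev f rest (PySem.List.pySetD nv (PySem.List.pyGetD prev node 0) node) vis
    else
      let vis1 := PySem.List.pySetD vis node true
      let d := PySem.List.pyGetD nv node 0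
      let dive := if d ≠ 0 ∧ PySem.List.pyGetD vis1 d false = false then [d] else []
      pvRun graph prev f (dive ++ PySem.List.pyGetD graph node [] ++ rest) nv vis1

def solution_alt (n : Int) (path : List (Int × Int)) (order : List (Int × Int)) : Bool :=
  let graph := pvGraph n path
  let prev := pvPrev n order
  if PySem.List.pyGetD prev 0 0 > 0 then false
  else
    let vis0 := PySem.List.pySetD (List.replicate n.toNat false) 0 true
    if PySem.List.pyGetD vis0 (PySem.List.pyGetD prev 0 0) false = false then
      -- root's deferred case: only next_visit changes, which the count never reads
      decide ((vis0.count true : Int) = n)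
    else
      let st := pvRun graph prev ((n.toNat + 1) * (2 * path.length + 2))
        (PySem.List.pyGetD graph 0 []) (List.replicate n.toNat (0 : Int)) vis0
      decide ((st.2.count true : Int) = n)

-- ===== PRECONDITION & SPEC =====
-- Pre_solution excludes inputs on which A raises IndexError (n ≤ 0, or an
-- out-of-range vertex in path/order); for an out-of-range first component of an
-- order pair A raises only if that entry is consulted during the search, so Pre_
-- also excludes some inputs on which A happens to return (see cites).
def Pre_solution (n : Int) (path : List (Int × Int)) (order : List (Int × Int)) : Prop :=
  1 ≤ n ∧ (∀ p ∈ path, -n ≤ p.1 ∧ p.1 < n ∧ -n ≤ p.2 ∧ p.2 < n)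
        ∧ (∀ p ∈ order, -n ≤ p.1 ∧ p.1 < n ∧ -n ≤ p.2 ∧ p.2 < n)
instance (n : Int) (path : List (Int × Int)) (order : List (Int × Int)) : Decidable (Pre_solution n path order) := by unfold Pre_solution; infer_instance

def pvWitness_solution : Int × (List (Int × Int)) × (List (Int × Int)) := (2, [(0, 1)], [])

def Spec_solution (n : Int) (path : List (Int × Int)) (order : List (Int × Int)) (out : Bool) : Prop := out = solution_alt n path order
instance (n : Int) (path : List (Int × Int)) (order : List (Int × Int)) (out : Bool) : Decidable (Spec_solution n path order out) := by unfold Spec_solution; infer_instance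

-- ===== CLAIM (what is proved, stated in full; the proofs are below) =====
def Claim_equal_solution : Prop := ∀ (n : Int) (path : List (Int × Int)) (order : List (Int × Int)), Dom_solution n path order → Pre_solution n path order → Spec_solution n path order (solution n path order)

-- ===== LEMMAS AND PROOFS =====

-- in-range indexing: pyGetD reads and pySetD writes the same Nat position
theorem pvIdx_char {α : Type} (l : List α) (i : Int)
    (h : PySem.Raise.InRange l.length i) :
    ∃ t, ∃ _ : t < l.length,
      (∀ d, PySem.List.pyGetD l i d = l[t]) ∧ (∀ v, PySem.List.pySetD l i v = l.set t v) := by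
  have h' : -(l.length : Int) ≤ i ∧ i < l.length := h
  have hidx : ∃ t, PySem.List.pyIdx? l.length i = some t ∧ t < l.length := by
    unfold PySem.List.pyIdx?
    split_ifs with h1 h2 h3
    · exact ⟨i.toNat, rfl, by omega⟩
    · omega
    · exact ⟨l.length - (-i).toNat, rfl, by omega⟩
    · omega
  obtain ⟨t, hsome, ht⟩ := hidx
  refine ⟨t, ht, fun d => ?_, fun v => ?_⟩
  · simp [PySem.List.pyGetD, PySem.List.pyGet?, hsome, List.getElem?_eq_getElem ht]
  · simp [PySem.List.pySetD, PySem.List.pySet?, hsome]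

theorem pvGetD_oob {α : Type} (l : List α) (i : Int) (d : α)
    (h : ¬ PySem.Raise.InRange l.length i) : PySem.List.pyGetD l i d = d := by
  simp [PySem.List.pyGetD, (PySem.List.pyGet?_eq_none_iff l i).2 h]

theorem pvSetD_oob {α : Type} (l : List α) (i : Int) (v : α)
    (h : ¬ PySem.Raise.InRange l.length i) : PySem.List.pySetD l i v = l := by
  simp [PySem.List.pySetD, (PySem.List.pySet?_eq_none_iff l i v).2 h]

theorem pvMem_setD {α : Type} {l : List α} {i : Int} {v x : α}
    (hx : x ∈ PySem.List.pySetD l i v) : x ∈ l ∨ x = v := by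
  by_cases h : PySem.Raise.InRange l.length i
  · obtain ⟨t, ht, -, hs⟩ := pvIdx_char l i h
    rw [hs] at hx; exact List.mem_or_eq_of_mem_set hx
  · rw [pvSetD_oob l i v h] at hx; exact Or.inl hx

theorem pvGetD_mem_or {α : Type} (l : List α) (i : Int) (d : α) :
    PySem.List.pyGetD l i d ∈ l ∨ PySem.List.pyGetD l i d = d := by
  by_cases h : PySem.Raise.InRange l.length i
  · exact Or.inl (PySem.List.pyGetD_mem l d h)
  · exact Or.inr (pvGetD_oob l i d h)

-- count-of-false bookkeeping
theorem pvCount_set_true_lt (l : List Bool) (t : Nat) (ht : t < l.length)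
    (hf : l[t] = false) : (l.set t true).count false < l.count false := by
  induction l generalizing t with
  | nil => simp at ht
  | cons a l ih =>
    cases t with
    | zero => simp_all
    | succ t =>
      simp only [List.set_cons_succ, List.count_cons]
      have := ih t (by simpa using ht) (by simpa using hf)
      split <;> omega

theorem pvCount_set_true_le (l : List Bool) (t : Nat) :
    (l.set t true).count false ≤ l.count false := by
  induction l generalizing t with
  | nil => simp
  | cons a l ih =>
    cases t with
    | zero =>
      cases a <;> simp
    | succ t =>
      simp only [List.set_cons_succ, List.count_cons]
      have := ih t
      split <;> omega

theorem pvCount_setD_le (vis : List Bool) (node : Int) :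
    (PySem.List.pySetD vis node true).count false ≤ vis.count false := by
  by_cases h : PySem.Raise.InRange vis.length node
  · obtain ⟨t, ht, -, hs⟩ := pvIdx_char vis node h
    rw [hs]; exact pvCount_set_true_le vis t
  · rw [pvSetD_oob vis node true h]

theorem pvCount_setD_lt (vis : List Bool) (node : Int)
    (h : PySem.Raise.InRange vis.length node)
    (hv : PySem.List.pyGetD vis node false = false) :
    (PySem.List.pySetD vis node true).count false < vis.count false := by
  obtain ⟨t, ht, hg, hs⟩ := pvIdx_char vis node h
  rw [hs]; exact pvCount_set_true_lt vis t ht ((hg false).symm.trans hv)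

-- invariants
structure PvCtx (graph : List (List Int)) (prev : List Int) (n : Int) (K : Nat) : Prop where
  n1 : 1 ≤ n
  lenG : graph.length = n.toNat
  lenP : prev.length = n.toNat
  okG : ∀ l ∈ graph, ∀ x ∈ l, -n ≤ x ∧ x < n
  okP : ∀ x ∈ prev, -n ≤ x ∧ x < n
  degG : ∀ l ∈ graph, l.length + 2 ≤ K
  k2 : 2 ≤ K

structure PvSt (n : Int) (nv : List Int) (vis : List Bool) : Prop where
  lenNv : nv.length = n.toNat
  lenVis : vis.length = n.toNat
  okNv : ∀ x ∈ nv, -n ≤ x ∧ x < n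

theorem pvInRange {n : Int} {x : Int} (n1 : 1 ≤ n) (len : Nat) (hlen : len = n.toNat)
    (hx : -n ≤ x ∧ x < n) : PySem.Raise.InRange len x := by
  subst hlen
  constructor <;> omega

-- graph-slot access: pyGetD graph node [] is a member of graph or []
theorem pvGetG_cases (graph : List (List Int)) (node : Int) :
    PySem.List.pyGetD graph node [] ∈ graph ∨ PySem.List.pyGetD graph node [] = ([] : List Int) :=
  pvGetD_mem_or graph node []

-- preservation: lengths, next_visit range invariant, count-false monotone
def PvPresDfs (graph : List (List Int)) (prev : List Int) (n : Int) (K : Nat) (f : Nat) : Prop :=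
  ∀ node nv vis, PvCtx graph prev n K → PvSt n nv vis → (-n ≤ node ∧ node < n) →
    PvSt n (pvDfs graph prev f node nv vis).1 (pvDfs graph prev f node nv vis).2 ∧
    (pvDfs graph prev f node nv vis).2.count false ≤ vis.count false

def PvPresList (graph : List (List Int)) (prev : List Int) (n : Int) (K : Nat) (f : Nat) : Prop :=
  ∀ frames nv vis, PvCtx graph prev n K → PvSt n nv vis → (∀ c ∈ frames, -n ≤ c ∧ c < n) →
    PvSt n (pvDfsList graph prev f frames nv vis).1 (pvDfsList graph prev f frames nv vis).2 ∧
    (pvDfsList graph prev f frames nv vis).2.count false ≤ vis.count false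

theorem pvPresList_of_dfs (graph : List (List Int)) (prev : List Int) (n : Int) (K : Nat) (f : Nat)
    (hd : PvPresDfs graph prev n K f) : PvPresList graph prev n K f := by
  intro frames
  induction frames with
  | nil => intro nv vis hc hst _; rw [pvDfsList]; exact ⟨hst, le_rfl⟩
  | cons c cs ih =>
    intro nv vis hc hst hfr
    rw [pvDfsList]
    split
    · have h1 := hd c nv vis hc hst (hfr c (List.mem_cons_self ..))
      have h2 := ih _ _ hc h1.1 (fun x hx => hfr x (List.mem_cons_of_mem _ hx))
      exact ⟨h2.1, le_trans h2.2 h1.2⟩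
    · exact ih _ _ hc hst (fun x hx => hfr x (List.mem_cons_of_mem _ hx))

theorem pvPres (graph : List (List Int)) (prev : List Int) (n : Int) (K : Nat) (f : Nat) :
    PvPresDfs graph prev n K f ∧ PvPresList graph prev n K f := by
  induction f with
  | zero =>
    have hd : PvPresDfs graph prev n K 0 := by
      intro node nv vis hc hst _
      rw [pvDfs]; exact ⟨hst, le_rfl⟩
    exact ⟨hd, pvPresList_of_dfs _ _ _ _ _ hd⟩
  | succ f ihf =>
    have hd : PvPresDfs graph prev n K (f + 1) := by
      intro node nv vis hc hst hnode
      rw [pvDfs]; dsimp only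
      split
      · refine ⟨⟨?_, hst.lenVis, ?_⟩, le_rfl⟩
        · simp [PySem.List.length_pySetD, hst.lenNv]
        · intro x hx
          rcases pvMem_setD hx with hx' | rfl
          · exact hst.okNv x hx'
          · exact hnode
      · -- marked branch
        have hst1 : PvSt n nv (PySem.List.pySetD vis node true) :=
          ⟨hst.lenNv, by simp [PySem.List.length_pySetD, hst.lenVis], hst.okNv⟩
        have hcnt1 : (PySem.List.pySetD vis node true).count false ≤ vis.count false :=
          pvCount_setD_le vis node
        have hfrg : ∀ x ∈ PySem.List.pyGetD graph node ([] : List Int), -n ≤ x ∧ x < n := by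
          rcases pvGetG_cases graph node with hm | he
          · exact hc.okG _ hm
          · rw [he]; intro x hx; simp at hx
        split
        · rename_i hdive
          have hdIn : -n ≤ PySem.List.pyGetD nv node 0 ∧ PySem.List.pyGetD nv node 0 < n := by
            rcases pvGetD_mem_or nv node (0 : Int) with hm | he
            · exact hst.okNv _ hm
            · rw [he]; constructor <;> [omega; exact lt_of_lt_of_le Int.zero_lt_one hc.n1]
          have h2 := ihf.1 (PySem.List.pyGetD nv node 0) nv _ hc hst1 hdIn
          have h3 := ihf.2 (PySem.List.pyGetD graph node []) _ _ hc h2.1 hfrg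
          exact ⟨h3.1, le_trans h3.2 (le_trans h2.2 hcnt1)⟩
        · have h3 := ihf.2 (PySem.List.pyGetD graph node []) _ _ hc hst1 hfrg
          exact ⟨h3.1, le_trans h3.2 hcnt1⟩
    exact ⟨hd, pvPresList_of_dfs _ _ _ _ _ hd⟩

-- fuel stability of A's dfs above the count-false bound
def PvStabList (graph : List (List Int)) (prev : List Int) (n : Int) (K : Nat) (μ : Nat) : Prop :=
  ∀ frames nv vis f f', PvCtx graph prev n K → PvSt n nv vis → (∀ c ∈ frames, -n ≤ c ∧ c < n) →
    vis.count false ≤ μ → μ < f → μ < f' →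
    pvDfsList graph prev f frames nv vis = pvDfsList graph prev f' frames nv vis

def PvStabDfs (graph : List (List Int)) (prev : List Int) (n : Int) (K : Nat) (μ : Nat) : Prop :=
  ∀ node nv vis f f', PvCtx graph prev n K → PvSt n nv vis → (-n ≤ node ∧ node < n) →
    PySem.List.pyGetD vis node false = false →
    vis.count false ≤ μ → μ < f → μ < f' →
    pvDfs graph prev f node nv vis = pvDfs graph prev f' node nv vis

theorem pvStabList_of_dfs (graph : List (List Int)) (prev : List Int) (n : Int) (K : Nat) (μ : Nat)
    (hd : PvStabDfs graph prev n K μ) : PvStabList graph prev n K μ := by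
  intro frames
  induction frames with
  | nil => intro nv vis f f' _ _ _ _ _ _; rw [pvDfsList, pvDfsList]
  | cons c cs ih =>
    intro nv vis f f' hc hst hfr hμ hf hf'
    rw [pvDfsList, pvDfsList]
    have hcin := hfr c (List.mem_cons_self ..)
    have hcs := fun x hx => hfr x (List.mem_cons_of_mem _ hx)
    split
    · rename_i hv
      have heq := hd c nv vis f f' hc hst hcin hv hμ hf hf'
      rw [heq]
      have hp := (pvPres graph prev n K f').1 c nv vis hc hst hcin
      exact ih _ _ f f' hc hp.1 hcs (le_trans hp.2 hμ) hf hf'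
    · exact ih _ _ f f' hc hst hcs hμ hf hf'

theorem pvStabAll (graph : List (List Int)) (prev : List Int) (n : Int) (K : Nat) (μ : Nat) :
    PvStabDfs graph prev n K μ ∧ PvStabList graph prev n K μ := by
  induction μ with
  | zero =>
    have hd : PvStabDfs graph prev n K 0 := by
      intro node nv vis f f' hc hst hnode hv hμ _ _
      have hin : PySem.Raise.InRange vis.length node := pvInRange hc.n1 _ hst.lenVis hnode
      have := pvCount_setD_lt vis node hin hv
      omega
    exact ⟨hd, pvStabList_of_dfs _ _ _ _ _ hd⟩
  | succ μ ihμ =>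
    have hd : PvStabDfs graph prev n K (μ + 1) := by
      intro node nv vis f f' hc hst hnode hv hμ hf hf'
      obtain ⟨φ, rfl⟩ : ∃ φ, f = φ + 1 := ⟨f - 1, by omega⟩
      obtain ⟨φ', rfl⟩ : ∃ φ', f' = φ' + 1 := ⟨f' - 1, by omega⟩
      rw [pvDfs, pvDfs]; dsimp only
      split
      · rfl
      · have hin : PySem.Raise.InRange vis.length node := pvInRange hc.n1 _ hst.lenVis hnode
        have hlt := pvCount_setD_lt vis node hin hv
        have hμ1 : (PySem.List.pySetD vis node true).count false ≤ μ := by omega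
        have hst1 : PvSt n nv (PySem.List.pySetD vis node true) :=
          ⟨hst.lenNv, by simp [PySem.List.length_pySetD, hst.lenVis], hst.okNv⟩
        have hfrg : ∀ x ∈ PySem.List.pyGetD graph node ([] : List Int), -n ≤ x ∧ x < n := by
          rcases pvGetG_cases graph node with hm | he
          · exact hc.okG _ hm
          · rw [he]; intro x hx; simp at hx
        split
        · rename_i hdive
          have hdIn : -n ≤ PySem.List.pyGetD nv node 0 ∧ PySem.List.pyGetD nv node 0 < n := by
            rcases pvGetD_mem_or nv node (0 : Int) with hm | he
            · exact hst.okNv _ hm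
            · rw [he]; constructor <;> [omega; exact lt_of_lt_of_le Int.zero_lt_one hc.n1]
          have heq2 := ihμ.1 (PySem.List.pyGetD nv node 0) nv _ φ φ' hc hst1 hdIn hdive.2 hμ1
            (by omega) (by omega)
          rw [heq2]
          have hp := (pvPres graph prev n K φ').1 (PySem.List.pyGetD nv node 0) nv _ hc hst1 hdIn
          exact ihμ.2 _ _ _ φ φ' hc hp.1 hfrg (le_trans hp.2 hμ1) (by omega) (by omega)
        · exact ihμ.2 _ _ _ φ φ' hc hst1 hfrg hμ1 (by omega) (by omega)
    exact ⟨hd, pvStabList_of_dfs _ _ _ _ _ hd⟩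

theorem pvStab (graph : List (List Int)) (prev : List Int) (n : Int) (K : Nat) (μ : Nat) :
    PvStabList graph prev n K μ :=
  (pvStabAll graph prev n K μ).2

-- processing an appended worklist = processing the parts in order
theorem pvDfsList_append (graph : List (List Int)) (prev : List Int) (f : Nat)
    (xs ys : List Int) (nv : List Int) (vis : List Bool) :
    pvDfsList graph prev f (xs ++ ys) nv vis =
      pvDfsList graph prev f ys (pvDfsList graph prev f xs nv vis).1 (pvDfsList graph prev f xs nv vis).2 := by
  induction xs generalizing nv vis with
  | nil => simp [pvDfsList]
  | cons c cs ih =>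
    rw [List.cons_append, pvDfsList, pvDfsList]
    split <;> exact ih _ _

-- simulation: B's stack machine runs A's worklist, consuming a bounded amount of fuel
def PvSim (graph : List (List Int)) (prev : List Int) (n : Int) (K : Nat) (μ : Nat) : Prop :=
  ∀ frames nv vis f, PvCtx graph prev n K → PvSt n nv vis → (∀ c ∈ frames, -n ≤ c ∧ c < n) →
    vis.count false ≤ μ → μ < f →
    ∃ c ≤ μ * K + frames.length, ∀ g,
      pvRun graph prev (g + c) frames nv vis = pvDfsList graph prev f frames nv vis

theorem pvRun_nil (graph : List (List Int)) (prev : List Int) (f : Nat)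
    (nv : List Int) (vis : List Bool) : pvRun graph prev f [] nv vis = (nv, vis) := by
  cases f <;> rw [pvRun]

theorem pvSim (graph : List (List Int)) (prev : List Int) (n : Int) (K : Nat) (μ : Nat) :
    PvSim graph prev n K μ := by
  induction μ using Nat.strong_induction_on with
  | _ μ ihμ =>
  intro frames
  induction frames with
  | nil =>
    intro nv vis f hc hst hfr hμ hf
    exact ⟨0, by simp, fun g => by rw [Nat.add_zero, pvRun_nil, pvDfsList]⟩
  | cons node rest ih =>
    intro nv vis f hc hst hfr hμ hf
    have hnode := hfr node (List.mem_cons_self ..)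
    have hrest := fun x hx => hfr x (List.mem_cons_of_mem node hx)
    rcases Bool.eq_false_or_eq_true (PySem.List.pyGetD vis node false) with hv | hv
    · -- node already visited: skip the frame
      obtain ⟨c', hc', hrun⟩ := ih nv vis f hc hst hrest hμ hf
      refine ⟨c' + 1, by simp only [List.length_cons]; omega, fun g => ?_⟩
      show pvRun graph prev ((g + c') + 1) (node :: rest) nv vis = _
      rw [pvRun, if_pos hv, hrun g, pvDfsList, if_neg (by simp [hv])]
    · -- node not yet visited
      replace hv : PySem.List.pyGetD vis node false = false := hv
      have hin : PySem.Raise.InRange vis.length node := pvInRange hc.n1 _ hst.lenVis hnode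
      have hlt := pvCount_setD_lt vis node hin hv
      obtain ⟨φ, rfl⟩ : ∃ φ, f = φ + 1 := ⟨f - 1, by omega⟩
      by_cases hg : PySem.List.pyGetD vis (PySem.List.pyGetD prev node 0) false = false
      · -- predecessor not visited yet: defer, only next_visit changes
        have hst' : PvSt n (PySem.List.pySetD nv (PySem.List.pyGetD prev node 0) node) vis :=
          ⟨by simp [PySem.List.length_pySetD, hst.lenNv], hst.lenVis,
           fun x hx => (pvMem_setD hx).elim (hst.okNv x) (fun h => h ▸ hnode)⟩
        obtain ⟨c', hc', hrun⟩ := ih _ vis (φ + 1) hc hst' hrest hμ hf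
        refine ⟨c' + 1, by simp only [List.length_cons]; omega, fun g => ?_⟩
        show pvRun graph prev ((g + c') + 1) (node :: rest) nv vis = _
        rw [pvRun, if_neg (by simp [hv]), if_pos hg]
        rw [hrun g, pvDfsList, if_pos hv, pvDfs]
        dsimp only
        rw [if_pos hg]
      · -- expand: mark node, push dive frame and neighbours
        have hμpos : 1 ≤ μ := by omega
        have hst1 : PvSt n nv (PySem.List.pySetD vis node true) :=
          ⟨hst.lenNv, by simp [PySem.List.length_pySetD, hst.lenVis], hst.okNv⟩
        have hμ1 : (PySem.List.pySetD vis node true).count false ≤ μ - 1 := by omega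
        have hdIn : -n ≤ PySem.List.pyGetD nv node 0 ∧ PySem.List.pyGetD nv node 0 < n := by
          rcases pvGetD_mem_or nv node (0 : Int) with hm | he
          · exact hst.okNv _ hm
          · rw [he]; constructor <;> [omega; exact lt_of_lt_of_le Int.zero_lt_one hc.n1]
        have hfrg : ∀ x ∈ PySem.List.pyGetD graph node ([] : List Int), -n ≤ x ∧ x < n := by
          rcases pvGetG_cases graph node with hm | he
          · exact hc.okG _ hm
          · rw [he]; intro x hx; simp at hx
        have hEfr : ∀ x ∈ ((if PySem.List.pyGetD nv node 0 ≠ 0 ∧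
              PySem.List.pyGetD (PySem.List.pySetD vis node true) (PySem.List.pyGetD nv node 0) false = false
            then [PySem.List.pyGetD nv node 0] else []) ++ PySem.List.pyGetD graph node [] ++ rest),
            -n ≤ x ∧ x < n := by
          intro x hx
          rcases List.mem_append.1 hx with hx' | hx'
          · rcases List.mem_append.1 hx' with h1 | h1
            · split at h1 <;> simp at h1
              exact h1 ▸ hdIn
            · exact hfrg x h1
          · exact hrest x hx'
        obtain ⟨c'', hc'', hrun''⟩ := ihμ (μ - 1) (by omega)
          ((if PySem.List.pyGetD nv node 0 ≠ 0 ∧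
              PySem.List.pyGetD (PySem.List.pySetD vis node true) (PySem.List.pyGetD nv node 0) false = false
            then [PySem.List.pyGetD nv node 0] else []) ++ PySem.List.pyGetD graph node [] ++ rest)
          nv (PySem.List.pySetD vis node true) φ hc hst1 hEfr hμ1 (by omega)
        have hgr : (PySem.List.pyGetD graph node ([] : List Int)).length + 2 ≤ K := by
          rcases pvGetG_cases graph node with hm | he
          · exact hc.degG _ hm
          · rw [he]; simpa using hc.k2
        have hmul : (μ - 1) * K + K = μ * K := by
          have h' : μ - 1 + 1 = μ := by omega
          calc (μ - 1) * K + K = (μ - 1 + 1) * K := by rw [Nat.succ_mul]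
          _ = μ * K := by rw [h']
        have hK := hc.k2
        refine ⟨c'' + 1, ?_, fun g => ?_⟩
        · have hlen : ((if PySem.List.pyGetD nv node 0 ≠ 0 ∧
              PySem.List.pyGetD (PySem.List.pySetD vis node true) (PySem.List.pyGetD nv node 0) false = false
            then [PySem.List.pyGetD nv node 0] else []) ++ PySem.List.pyGetD graph node [] ++ rest).length
              ≤ (K - 1) + rest.length := by
            simp only [List.length_append]
            split <;> simp only [List.length_cons, List.length_nil] <;> omega
          simp only [List.length_cons]
          omega
        · show pvRun graph prev ((g + c'') + 1) (node :: rest) nv vis = _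
          rw [pvRun, if_neg (by simp [hv]), if_neg hg]
          dsimp only
          rw [hrun'' g]
          rw [pvDfsList, if_pos hv]
          have hAstep : pvDfs graph prev (φ + 1) node nv vis =
              pvDfsList graph prev φ
                ((if PySem.List.pyGetD nv node 0 ≠ 0 ∧
                    PySem.List.pyGetD (PySem.List.pySetD vis node true) (PySem.List.pyGetD nv node 0) false = false
                  then [PySem.List.pyGetD nv node 0] else []) ++ PySem.List.pyGetD graph node [])
                nv (PySem.List.pySetD vis node true) := by
            rw [pvDfs]
            dsimp only
            rw [if_neg hg]
            by_cases hdv : PySem.List.pyGetD nv node 0 ≠ 0 ∧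
                PySem.List.pyGetD (PySem.List.pySetD vis node true) (PySem.List.pyGetD nv node 0) false = false
            · rw [if_pos hdv, if_pos hdv, List.cons_append, List.nil_append, pvDfsList, if_pos hdv.2]
            · rw [if_neg hdv, if_neg hdv, List.nil_append]
          rw [pvDfsList_append, hAstep]
          have hp := (pvPres graph prev n K φ).2
            ((if PySem.List.pyGetD nv node 0 ≠ 0 ∧
                PySem.List.pyGetD (PySem.List.pySetD vis node true) (PySem.List.pyGetD nv node 0) false = false
              then [PySem.List.pyGetD nv node 0] else []) ++ PySem.List.pyGetD graph node [])
            nv (PySem.List.pySetD vis node true) hc hst1 (by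
              intro x hx
              rcases List.mem_append.1 hx with hx' | hx'
              · split at hx' <;> simp at hx'
                exact hx' ▸ hdIn
              · exact hfrg x hx')
          exact pvStab graph prev n K (μ - 1) rest _ _ φ (φ + 1) hc hp.1 hrest
            (le_trans hp.2 hμ1) (by omega) (by omega)

-- builder facts

theorem pvGraph_len (n : Int) (path : List (Int × Int)) : (pvGraph n path).length = n.toNat := by
  unfold pvGraph
  have : ∀ (ps : List (Int × Int)) (g : List (List Int)),
      (ps.foldl (fun g ab =>
        let g1 := PySem.List.pySetD g ab.1 (PySem.List.pyGetD g ab.1 [] ++ [ab.2])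
        PySem.List.pySetD g1 ab.2 (PySem.List.pyGetD g1 ab.2 [] ++ [ab.1])) g).length = g.length := by
    intro ps
    induction ps with
    | nil => intro g; rfl
    | cons p ps ih => intro g; rw [List.foldl_cons, ih]; simp [PySem.List.length_pySetD]
  rw [this]; simp

theorem pvGraph_ok (n : Int) (path : List (Int × Int))
    (h : ∀ p ∈ path, -n ≤ p.1 ∧ p.1 < n ∧ -n ≤ p.2 ∧ p.2 < n) :
    ∀ l ∈ pvGraph n path, ∀ x ∈ l, -n ≤ x ∧ x < n := by
  unfold pvGraph
  have main : ∀ (ps : List (Int × Int)) (g : List (List Int)),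
      (∀ p ∈ ps, -n ≤ p.1 ∧ p.1 < n ∧ -n ≤ p.2 ∧ p.2 < n) →
      (∀ l ∈ g, ∀ x ∈ l, -n ≤ x ∧ x < n) →
      ∀ l ∈ (ps.foldl (fun g ab =>
        let g1 := PySem.List.pySetD g ab.1 (PySem.List.pyGetD g ab.1 [] ++ [ab.2])
        PySem.List.pySetD g1 ab.2 (PySem.List.pyGetD g1 ab.2 [] ++ [ab.1])) g), ∀ x ∈ l, -n ≤ x ∧ x < n := by
    intro ps
    induction ps with
    | nil => intro g _ hg; exact hg
    | cons p ps ih =>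
      intro g hps hg
      rw [List.foldl_cons]
      have hp := hps p (List.mem_cons_self ..)
      refine ih _ (fun q hq => hps q (List.mem_cons_of_mem _ hq)) ?_
      intro l hl x hx
      have step : ∀ (g' : List (List Int)) (i : Int) (v : Int),
          (∀ l ∈ g', ∀ x ∈ l, -n ≤ x ∧ x < n) → (-n ≤ v ∧ v < n) →
          ∀ l ∈ PySem.List.pySetD g' i (PySem.List.pyGetD g' i [] ++ [v]), ∀ x ∈ l, -n ≤ x ∧ x < n := by
        intro g' i v hg' hv l hl x hx
        rcases pvMem_setD hl with hl' | rfl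
        · exact hg' l hl' x hx
        · rcases List.mem_append.1 hx with hx' | hx'
          · rcases pvGetD_mem_or g' i ([] : List Int) with hm | he
            · exact hg' _ hm x hx'
            · rw [he] at hx'; simp at hx'
          · simp at hx'; subst hx'; exact hv
      exact step _ p.2 p.1 (step g p.1 p.2 hg ⟨hp.2.2.1, hp.2.2.2⟩) ⟨hp.1, hp.2.1⟩ l hl x hx
  exact main path _ h (by intro l hl; simp [List.eq_of_mem_replicate hl])

theorem pvGraph_deg (n : Int) (path : List (Int × Int)) :
    ∀ l ∈ pvGraph n path, l.length ≤ 2 * path.length := by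
  unfold pvGraph
  have main : ∀ (ps : List (Int × Int)) (g : List (List Int)) (c : Nat),
      (∀ l ∈ g, l.length ≤ c) →
      ∀ l ∈ (ps.foldl (fun g ab =>
        let g1 := PySem.List.pySetD g ab.1 (PySem.List.pyGetD g ab.1 [] ++ [ab.2])
        PySem.List.pySetD g1 ab.2 (PySem.List.pyGetD g1 ab.2 [] ++ [ab.1])) g), l.length ≤ c + 2 * ps.length := by
    intro ps
    induction ps with
    | nil => intro g c hg l hl; simpa using hg l hl
    | cons p ps ih =>
      intro g c hg
      rw [List.foldl_cons]
      have step : ∀ (g' : List (List Int)) (i : Int) (v : Int) (c' : Nat),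
          (∀ l ∈ g', l.length ≤ c') →
          ∀ l ∈ PySem.List.pySetD g' i (PySem.List.pyGetD g' i [] ++ [v]), l.length ≤ c' + 1 := by
        intro g' i v c' hg' l hl
        rcases pvMem_setD hl with hl' | rfl
        · exact le_trans (hg' l hl') (Nat.le_succ c')
        · rcases pvGetD_mem_or g' i ([] : List Int) with hm | he
          · simpa using Nat.add_le_add_right (hg' _ hm) 1
          · rw [he]; simp
      have h2 := step _ p.2 p.1 (c + 1) (step g p.1 p.2 c hg)
      intro l hl
      have := ih _ (c + 2) (by simpa [Nat.add_assoc] using h2) l hl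
      simp only [List.length_cons] at *
      omega
  intro l hl
  simpa using main path _ 0 (by intro l hl; simp [List.eq_of_mem_replicate hl]) l hl

theorem pvPrev_len (n : Int) (order : List (Int × Int)) : (pvPrev n order).length = n.toNat := by
  unfold pvPrev
  have : ∀ (os : List (Int × Int)) (p : List Int),
      (os.foldl (fun p ab => PySem.List.pySetD p ab.2 ab.1) p).length = p.length := by
    intro os
    induction os with
    | nil => intro p; rfl
    | cons o os ih => intro p; rw [List.foldl_cons, ih]; simp [PySem.List.length_pySetD]
  rw [this]; simp

theorem pvPrev_ok (n : Int) (order : List (Int × Int)) (n1 : 1 ≤ n)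
    (h : ∀ p ∈ order, -n ≤ p.1 ∧ p.1 < n ∧ -n ≤ p.2 ∧ p.2 < n) :
    ∀ x ∈ pvPrev n order, -n ≤ x ∧ x < n := by
  unfold pvPrev
  have main : ∀ (os : List (Int × Int)) (p : List Int),
      (∀ q ∈ os, -n ≤ q.1 ∧ q.1 < n ∧ -n ≤ q.2 ∧ q.2 < n) →
      (∀ x ∈ p, -n ≤ x ∧ x < n) →
      ∀ x ∈ (os.foldl (fun p ab => PySem.List.pySetD p ab.2 ab.1) p), -n ≤ x ∧ x < n := by
    intro os
    induction os with
    | nil => intro p _ hp; exact hp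
    | cons o os ih =>
      intro p hos hp
      rw [List.foldl_cons]
      refine ih _ (fun q hq => hos q (List.mem_cons_of_mem _ hq)) ?_
      intro x hx
      rcases pvMem_setD hx with hx' | rfl
      · exact hp x hx'
      · have := hos o (List.mem_cons_self ..); exact ⟨this.1, this.2.1⟩
  exact main order _ h (by intro x hx; have := List.eq_of_mem_replicate hx; subst this; omega)

-- A's counting loop equals n + List.count true
theorem pvFoldl_count (l : List Bool) (c : Int) :
    l.foldl (fun c b => if b then c + 1 else c) c = c + (l.count true : Int) := by
  induction l generalizing c with
  | nil => simp
  | cons b l ih =>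
    cases b
    · simpa using ih c
    · simp [ih]; ring

-- ===== VERDICT (by name: the statement is the Claim_ definition above) =====
theorem solution_spec : Claim_equal_solution := by
  intro n path order _ hPre
  obtain ⟨hn1, hpath, horder⟩ := hPre
  unfold Spec_solution solution solution_alt
  dsimp only
  set K := 2 * path.length + 2 with hK
  have hctx : PvCtx (pvGraph n path) (pvPrev n order) n K :=
    ⟨hn1, pvGraph_len n path, pvPrev_len n order, pvGraph_ok n path hpath,
     pvPrev_ok n order hn1 horder,
     fun l hl => by have := pvGraph_deg n path l hl; omega, by omega⟩
  by_cases hb : PySem.List.pyGetD (pvPrev n order) 0 0 > 0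
  · rw [if_pos hb, if_pos hb]
  · rw [if_neg hb, if_neg hb]
    set vis0 := PySem.List.pySetD (List.replicate n.toNat false) 0 true with hv0
    have hlenv0 : vis0.length = n.toNat := by
      rw [hv0, PySem.List.length_pySetD, List.length_replicate]
    by_cases hguard : PySem.List.pyGetD vis0 (PySem.List.pyGetD (pvPrev n order) 0 0) false = false
    · rw [if_pos hguard]
      have hA : pvDfs (pvGraph n path) (pvPrev n order) (n.toNat + 2) 0
          (List.replicate n.toNat (0 : Int)) vis0 =
          (PySem.List.pySetD (List.replicate n.toNat (0 : Int))
            (PySem.List.pyGetD (pvPrev n order) 0 0) 0, vis0) := by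
        show pvDfs _ _ ((n.toNat + 1) + 1) 0 _ _ = _
        rw [pvDfs]
        dsimp only
        rw [if_pos hguard]
      rw [hA]
      simp [pvFoldl_count]
    · rw [if_neg hguard]
      have hvis0set : vis0 = (List.replicate n.toNat false).set 0 true := by
        rw [hv0, PySem.List.pySetD_of_nonneg _ _ le_rfl]; norm_num
      have hvis1 : PySem.List.pySetD vis0 0 true = vis0 := by
        rw [PySem.List.pySetD_of_nonneg _ _ le_rfl, hvis0set]
        simp [List.set_set]
      have hd0 : PySem.List.pyGetD (List.replicate n.toNat (0 : Int)) 0 0 = 0 := by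
        rcases pvGetD_mem_or (List.replicate n.toNat (0 : Int)) 0 0 with hm | he
        · exact List.eq_of_mem_replicate hm
        · exact he
      have hA : pvDfs (pvGraph n path) (pvPrev n order) (n.toNat + 2) 0
          (List.replicate n.toNat (0 : Int)) vis0 =
          pvDfsList (pvGraph n path) (pvPrev n order) (n.toNat + 1)
            (PySem.List.pyGetD (pvGraph n path) 0 []) (List.replicate n.toNat (0 : Int)) vis0 := by
        show pvDfs _ _ ((n.toNat + 1) + 1) 0 _ _ = _
        rw [pvDfs]
        dsimp only
        rw [if_neg hguard, if_neg (by simp [hd0]), hvis1]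
      rw [hA]
      have hst : PvSt n (List.replicate n.toNat (0 : Int)) vis0 :=
        ⟨List.length_replicate, hlenv0,
         fun x hx => by have := List.eq_of_mem_replicate hx; subst this; omega⟩
      have hfr0 : ∀ x ∈ PySem.List.pyGetD (pvGraph n path) 0 ([] : List Int), -n ≤ x ∧ x < n := by
        rcases pvGetG_cases (pvGraph n path) 0 with hm | he
        · exact pvGraph_ok n path hpath _ hm
        · rw [he]; intro x hx; simp at hx
      have hμf : vis0.count false < n.toNat + 1 := by
        have := List.count_le_length (a := false) (l := vis0)
        omega
      obtain ⟨c, hcb, hrun⟩ := pvSim (pvGraph n path) (pvPrev n order) n K (vis0.count false)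
        (PySem.List.pyGetD (pvGraph n path) 0 []) (List.replicate n.toNat (0 : Int)) vis0
        (n.toNat + 1) hctx hst hfr0 le_rfl hμf
      have hglen : (PySem.List.pyGetD (pvGraph n path) 0 ([] : List Int)).length ≤ K - 2 := by
        rcases pvGetG_cases (pvGraph n path) 0 with hm | he
        · have := pvGraph_deg n path _ hm; omega
        · rw [he]; simp
      have hcF : c ≤ (n.toNat + 1) * K := by
        have h1 : vis0.count false * K ≤ n.toNat * K :=
          Nat.mul_le_mul_right K (by omega)
        have h2 : (n.toNat + 1) * K = n.toNat * K + K := by rw [Nat.succ_mul]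
        omega
      have hF : (n.toNat + 1) * K = ((n.toNat + 1) * K - c) + c := by omega
      rw [hF, hrun ((n.toNat + 1) * K - c)]
      simp [pvFoldl_count]
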